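-- pv_equiv track=rewrite | github.com/choijin/MLOps | orchestrator/training_pipeline.py | iter_month_pairs
-- ===== SOURCE A (Python) =====
-- def iter_month_pairs(start_year: int, start_month: int, end_year: int, end_month: int):
--     y, m = start_year, start_month
--     while (y < end_year) or (y == end_year and m <= end_month):
--         yield y, m
--         if m == 12:
--             y += 1
--             m = 1
--         else:
--             m += 1
-- ===== SOURCE B (Python) =====
-- def iter_month_pairs(start_year: int, start_month: int, end_year: int, end_month: int):
--     if (start_year, start_month) > (end_year, end_month):
--         return
--     start = start_year * 12 + start_month - 1
--     end = end_year * 12 + end_month - 1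
--     for idx in range(start, end + 1):
--         yield idx // 12, idx % 12 + 1
-- ===== Notes on version B (the rewrite author's own statement) =====
-- stated objective: alternative
-- what changed: Replaces the manual year/month carry loop with a single linear month-index counter (range over start_year*12+start_month-1 .. end_year*12+end_month-1) decoded by divmod; Pre_ restricts months to the calendar range 1..12 (or an empty range), since outside it A either diverges or yields raw out-of-calendar month values that the index decoding naturally normalizes.
-- outside the precondition, e.g. on iter_month_pairs(0, 0, 0, 0): A returns [(0, 0)], B returns [(-1, 12)]; on iter_month_pairs(0, 12, 0, 13): A returns [(0, 12)], B returns [(0, 12), (1, 1)]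
import Mathlib
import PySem

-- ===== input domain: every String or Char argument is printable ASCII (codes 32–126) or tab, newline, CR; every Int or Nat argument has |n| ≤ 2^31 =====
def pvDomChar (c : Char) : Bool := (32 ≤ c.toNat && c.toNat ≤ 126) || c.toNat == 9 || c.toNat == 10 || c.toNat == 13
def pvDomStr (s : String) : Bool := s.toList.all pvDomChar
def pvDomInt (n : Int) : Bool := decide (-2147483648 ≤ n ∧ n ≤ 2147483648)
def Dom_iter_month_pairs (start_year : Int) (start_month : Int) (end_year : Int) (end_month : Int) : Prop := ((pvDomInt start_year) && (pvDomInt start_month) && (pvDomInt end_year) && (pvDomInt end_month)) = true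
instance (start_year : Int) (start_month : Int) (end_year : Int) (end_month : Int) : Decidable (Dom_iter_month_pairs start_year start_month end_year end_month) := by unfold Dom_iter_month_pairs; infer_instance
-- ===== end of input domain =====

-- B replaces A's year/month carry loop by one linear month-index range decoded with divmod;
-- equivalence is proved on calendar months 1..12 (or an empty range).

-- ===== PORT A =====
-- A's while-loop, step for step; fuel bounds the iterations (the Python loop diverges when
-- start_month lies outside 1..12 and start_year < end_year — such inputs are outside Pre_;
-- on every input where the Python loop terminates the fuel below exceeds its iteration count).
def pvLoopA (end_year end_month : Int) : Nat → Int → Int → List (Int × Int)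
  | 0, _, _ => []
  | fuel+1, y, m =>
    if y < end_year ∨ (y = end_year ∧ m ≤ end_month) then
      (y, m) :: (if m = 12 then pvLoopA end_year end_month fuel (y+1) 1
                 else pvLoopA end_year end_month fuel y (m+1))
    else []

def iter_month_pairs (start_year : Int) (start_month : Int) (end_year : Int) (end_month : Int) : List (Int × Int) :=
  pvLoopA end_year end_month ((12*(end_year - start_year) + 13).toNat + (end_month - start_month + 1).toNat) start_year start_month

-- ===== PORT B =====
def iter_month_pairs_alt (start_year : Int) (start_month : Int) (end_year : Int) (end_month : Int) : List (Int × Int) :=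
  if start_year > end_year ∨ (start_year = end_year ∧ start_month > end_month) then []
  else
    (PySem.List.pyRange (start_year*12 + start_month - 1) (end_year*12 + end_month - 1 + 1) 1).map
      (fun idx => (PySem.Int.floordiv idx 12, PySem.Int.mod idx 12 + 1))

-- ===== PRECONDITION & SPEC =====
-- Pre_ excludes out-of-calendar month arguments on a nonempty range: there A either diverges
-- (start_month outside 1..12 with start_year < end_year) or yields raw out-of-range month
-- values that B's index decoding naturally normalizes; empty ranges are kept for any months.
def Pre_iter_month_pairs (start_year : Int) (start_month : Int) (end_year : Int) (end_month : Int) : Prop :=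
  (1 ≤ start_month ∧ start_month ≤ 12 ∧ 1 ≤ end_month ∧ end_month ≤ 12) ∨
  (start_year > end_year ∨ (start_year = end_year ∧ start_month > end_month))
instance (start_year : Int) (start_month : Int) (end_year : Int) (end_month : Int) : Decidable (Pre_iter_month_pairs start_year start_month end_year end_month) := by unfold Pre_iter_month_pairs; infer_instance

def pvWitness_iter_month_pairs : Int × Int × Int × Int := (2019, 11, 2021, 2)

def Spec_iter_month_pairs (start_year : Int) (start_month : Int) (end_year : Int) (end_month : Int) (out : List (Int × Int)) : Prop := out = iter_month_pairs_alt start_year start_month end_year end_month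
instance (start_year : Int) (start_month : Int) (end_year : Int) (end_month : Int) (out : List (Int × Int)) : Decidable (Spec_iter_month_pairs start_year start_month end_year end_month out) := by unfold Spec_iter_month_pairs; infer_instance

-- ===== CLAIM (what is proved, stated in full; the proofs are below) =====
def Claim_equal_iter_month_pairs : Prop := ∀ (start_year : Int) (start_month : Int) (end_year : Int) (end_month : Int), Dom_iter_month_pairs start_year start_month end_year end_month → Pre_iter_month_pairs start_year start_month end_year end_month → Spec_iter_month_pairs start_year start_month end_year end_month (iter_month_pairs start_year start_month end_year end_month)

-- ===== LEMMAS AND PROOFS =====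

-- When the loop condition is false, A's loop returns [] for any fuel.
theorem pvLoopA_stop (ey em : Int) (fuel : Nat) (y m : Int)
    (h : ¬ (y < ey ∨ (y = ey ∧ m ≤ em))) : pvLoopA ey em fuel y m = [] := by
  cases fuel with
  | zero => rfl
  | succ n => simp [pvLoopA, h]

-- Decoding the month index 12*y + (m-1) gives back (y, m) for 1 ≤ m ≤ 12.
theorem pvDecode (y m : Int) (h1 : 1 ≤ m) (h2 : m ≤ 12) :
    (PySem.Int.floordiv (12*y + m - 1) 12, PySem.Int.mod (12*y + m - 1) 12 + 1) = (y, m) := by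
  rw [PySem.Int.floordiv_eq_ediv_of_pos (by omega), PySem.Int.mod_eq_emod_of_pos (by omega)]
  simp only [Prod.mk.injEq]; omega

-- Main invariant: with calendar months and enough fuel, A's loop from (y, m) equals B's
-- decoded index range starting at 12*y + m - 1.
theorem pvLoopA_eq (ey em : Int) (hem1 : 1 ≤ em) (hem2 : em ≤ 12) :
    ∀ (fuel : Nat) (y m : Int), 1 ≤ m → m ≤ 12 →
      12*ey + em - (12*y + m) + 1 ≤ (fuel : Int) →
      pvLoopA ey em fuel y m =
        (PySem.List.pyRange (12*y + m - 1) (12*ey + em - 1 + 1) 1).map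
          (fun idx => (PySem.Int.floordiv idx 12, PySem.Int.mod idx 12 + 1)) := by
  intro fuel
  induction fuel with
  | zero =>
    intro y m h1 h2 hf
    rw [PySem.List.pyRange_one_eq_nil (by exact_mod_cast (by omega : (12:Int)*ey + em - 1 + 1 ≤ 12*y + m - 1))]
    exact pvLoopA_stop ey em 0 y m (by omega)
  | succ n ih =>
    intro y m h1 h2 hf
    by_cases hc : y < ey ∨ (y = ey ∧ m ≤ em)
    · have hlt : 12*y + m - 1 < 12*ey + em - 1 + 1 := by omega
      rw [PySem.List.pyRange_one_cons hlt, List.map_cons, pvDecode y m h1 h2]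
      show pvLoopA ey em (n+1) y m = _
      by_cases hm : m = 12
      · simp only [pvLoopA, if_pos hc, if_pos hm]
        have hb : 12*ey + em - (12*(y+1) + 1) + 1 ≤ (n : Int) := by omega
        have hx : (12:Int)*(y+1) + 1 - 1 = 12*y + m - 1 + 1 := by omega
        rw [ih (y+1) 1 (by omega) (by omega) hb, hx]
      · simp only [pvLoopA, if_pos hc, if_neg hm]
        have hb : 12*ey + em - (12*y + (m+1)) + 1 ≤ (n : Int) := by omega
        have hx : 12*y + (m+1) - 1 = 12*y + m - 1 + 1 := by omega
        rw [ih y (m+1) (by omega) (by omega) hb, hx]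
    · rw [pvLoopA_stop ey em (n+1) y m hc,
          PySem.List.pyRange_one_eq_nil (by omega : (12:Int)*ey + em - 1 + 1 ≤ 12*y + m - 1),
          List.map_nil]

-- ===== VERDICT (by name: the statement is the Claim_ definition above) =====
theorem iter_month_pairs_spec : Claim_equal_iter_month_pairs := by
  intro sy sm ey em _ hpre
  unfold Spec_iter_month_pairs iter_month_pairs iter_month_pairs_alt
  by_cases hempty : sy > ey ∨ (sy = ey ∧ sm > em)
  · rw [if_pos hempty, pvLoopA_stop ey em _ sy sm (by omega)]
  · rcases hpre with ⟨h1, h2, h3, h4⟩ | h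
    · rw [if_neg hempty,
        pvLoopA_eq ey em h3 h4 _ sy sm h1 h2 (by omega)]
      have h6 : 12*sy + sm - 1 = sy*12 + sm - 1 := by ring
      rw [h6]
      congr 2
      omega
    · exact absurd h hempty
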